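-- pv_equiv track=rewrite | github.com/uninghetvatly/python-group-study-project | BaoHuynh/Codeforce_ex.py | process_seat_arrangements
-- ===== SOURCE A (Python) =====
-- def process_seat_arrangements(a, r, c, k):
--     num = 0
--     if k > r and k > c:
--         return 0
--     for i in range(r):
--         count = 0
--         for j in range(c):
--             if a[i][j] == '.':
--                 count += 1
--             else:
--                 count = 0
--             if count >= k:
--                 num += 1
--     if k == 1:
--         return num
--     for j in range(c):
--         count_c = 0
--         for i in range(r):
--             if a[i][j] == '.':
--                 count_c += 1
--             else:
--                 count_c = 0
--             if count_c >= k: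
--                 num += 1
--     return num
-- ===== SOURCE B (Python) =====
-- def process_seat_arrangements(a, r, c, k):
--     if k > r and k > c:
--         return 0
--     total = 0
--     for i in range(r):
--         pref = [0]
--         for j in range(c):
--             pref.append(pref[-1] + (a[i][j] == '.'))
--         for j in range(c):
--             if j + 1 >= k and pref[j + 1] - pref[j + 1 - k] == k:
--                 total += 1
--     if k == 1:
--         return total
--     for j in range(c):
--         pref = [0]
--         for i in range(r):
--             pref.append(pref[-1] + (a[i][j] == '.'))
--         for i in range(r):
--             if i + 1 >= k and pref[i + 1] - pref[i + 1 - k] == k: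
--                 total += 1
--     return total
-- ===== Notes on version B (the rewrite author's own statement) =====
-- stated objective: alternative
-- what changed: Replaces A's reset-on-wall running counter with per-line prefix counts of free cells and a windowed scan (a length-k window is all free iff pref[j+1]-pref[j+1-k]==k), keeping A's no-window-fits fast path and its k==1 single-pass early return.
-- outside the precondition, e.g. on process_seat_arrangements(['.'], 1, 1, -1): A returns 2, B raises IndexError
import Mathlib
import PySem

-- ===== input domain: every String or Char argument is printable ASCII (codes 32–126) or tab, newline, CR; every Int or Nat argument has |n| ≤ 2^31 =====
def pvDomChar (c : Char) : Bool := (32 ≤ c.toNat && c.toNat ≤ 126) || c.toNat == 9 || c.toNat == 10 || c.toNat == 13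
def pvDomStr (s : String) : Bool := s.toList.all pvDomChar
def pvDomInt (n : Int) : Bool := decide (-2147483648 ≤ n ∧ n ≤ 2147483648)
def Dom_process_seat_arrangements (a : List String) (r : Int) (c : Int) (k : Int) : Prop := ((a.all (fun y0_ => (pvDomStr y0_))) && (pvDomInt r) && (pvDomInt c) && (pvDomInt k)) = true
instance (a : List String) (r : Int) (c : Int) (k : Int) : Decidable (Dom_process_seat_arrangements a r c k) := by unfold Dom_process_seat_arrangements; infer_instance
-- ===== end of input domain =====

-- B replaces A's reset-on-wall running counter by per-line prefix counts of free
-- cells with a windowed scan (same O(r*c) cost, a different algorithm).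

-- ===== PORT A =====
-- a[i][j] == '.' (shared atomic cell access of both Pythons; none = IndexError,
-- which Pre_ rules out on every cell the programs actually read)
def pvFree (a : List String) (i j : Int) : Bool :=
  ((PySem.List.pyGet? a i).bind (fun s => PySem.Str.pyGet? s j)) == some '.'

def process_seat_arrangements (a : List String) (r : Int) (c : Int) (k : Int) : Int :=
  if k > r ∧ k > c then 0
  else
    let num := (PySem.List.pyRange 0 r 1).foldl (fun num i =>
      ((PySem.List.pyRange 0 c 1).foldl (fun (p : Int × Int) j =>
        let count := if pvFree a i j then p.2 + 1 else 0
        (if count ≥ k then p.1 + 1 else p.1, count)) (num, 0)).1) 0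
    if k = 1 then num
    else (PySem.List.pyRange 0 c 1).foldl (fun num j =>
      ((PySem.List.pyRange 0 r 1).foldl (fun (p : Int × Int) i =>
        let count := if pvFree a i j then p.2 + 1 else 0
        (if count ≥ k then p.1 + 1 else p.1, count)) (num, 0)).1) num

-- ===== PORT B =====
def process_seat_arrangements_alt (a : List String) (r : Int) (c : Int) (k : Int) : Int :=
  if k > r ∧ k > c then 0
  else
  let total := (PySem.List.pyRange 0 r 1).foldl (fun total i =>
    let pref := (PySem.List.pyRange 0 c 1).foldl (fun pref j =>
      pref ++ [PySem.List.pyGetD pref (-1) 0 + (if pvFree a i j then 1 else 0)]) [(0 : Int)]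
    (PySem.List.pyRange 0 c 1).foldl (fun total j =>
      if j + 1 ≥ k ∧ PySem.List.pyGetD pref (j + 1) 0 - PySem.List.pyGetD pref (j + 1 - k) 0 = k
      then total + 1 else total) total) 0
  if k = 1 then total
  else (PySem.List.pyRange 0 c 1).foldl (fun total j =>
    let pref := (PySem.List.pyRange 0 r 1).foldl (fun pref i =>
      pref ++ [PySem.List.pyGetD pref (-1) 0 + (if pvFree a i j then 1 else 0)]) [(0 : Int)]
    (PySem.List.pyRange 0 r 1).foldl (fun total i =>
      if i + 1 ≥ k ∧ PySem.List.pyGetD pref (i + 1) 0 - PySem.List.pyGetD pref (i + 1 - k) 0 = k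
      then total + 1 else total) total) total

-- ===== PRECONDITION & SPEC =====
-- Pre_ excludes (besides A's IndexError inputs) exactly the inputs with negative k on
-- which A still returns a value (its 'count >= k' test is then vacuously true) while
-- some cell is visited (r ≥ 1, c ≥ 1, no k > r and k > c fast path): there B's
-- window-index arithmetic raises IndexError.
def Pre_process_seat_arrangements (a : List String) (r : Int) (c : Int) (k : Int) : Prop :=
  (1 ≤ r ∧ 1 ≤ c ∧ ¬(k > r ∧ k > c)) →
    (0 ≤ k ∧ r ≤ (a.length : Int) ∧ ∀ s ∈ a.take r.toNat, c ≤ (s.toList.length : Int))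
instance (a : List String) (r : Int) (c : Int) (k : Int) : Decidable (Pre_process_seat_arrangements a r c k) := by unfold Pre_process_seat_arrangements; infer_instance

def pvWitness_process_seat_arrangements : List String × Int × Int × Int :=
  (["..#.", ".#..", "...."], 3, 4, 2)

def Spec_process_seat_arrangements (a : List String) (r : Int) (c : Int) (k : Int) (out : Int) : Prop := out = process_seat_arrangements_alt a r c k
instance (a : List String) (r : Int) (c : Int) (k : Int) (out : Int) : Decidable (Spec_process_seat_arrangements a r c k out) := by unfold Spec_process_seat_arrangements; infer_instance

-- ===== CLAIM (what is proved, stated in full; the proofs are below) =====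
def Claim_equal_process_seat_arrangements : Prop := ∀ (a : List String) (r : Int) (c : Int) (k : Int), Dom_process_seat_arrangements a r c k → Pre_process_seat_arrangements a r c k → Spec_process_seat_arrangements a r c k (process_seat_arrangements a r c k)

-- ===== LEMMAS AND PROOFS =====

-- run length of free cells ending at position m (A's `count` after m cells)
def pvRun (cell : Nat → Bool) : Nat → Nat
  | 0 => 0
  | m + 1 => if cell m then pvRun cell m + 1 else 0

-- number of free cells among the first m (B's pref[m])
def pvSig (cell : Nat → Bool) : Nat → Int
  | 0 => 0
  | m + 1 => pvSig cell m + (if cell m then 1 else 0)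

-- common count: positions m+1 ≤ n whose trailing window of length K is all free
def pvCnt (cell : Nat → Bool) (K : Nat) : Nat → Int
  | 0 => 0
  | m + 1 => pvCnt cell K m + (if K ≤ pvRun cell (m + 1) then 1 else 0)

theorem pvSig_bounds (cell : Nat → Bool) (x K : Nat) :
    0 ≤ pvSig cell (x + K) - pvSig cell x ∧ pvSig cell (x + K) - pvSig cell x ≤ K := by
  induction K with
  | zero => simp
  | succ K ih => rw [show x + (K+1) = (x+K)+1 by ring, pvSig]; split_ifs <;> omega

theorem pvSig_window (cell : Nat → Bool) (x K : Nat) :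
    pvSig cell (x + K) - pvSig cell x = K ↔ ∀ t, x ≤ t → t < x + K → cell t = true := by
  induction K with
  | zero => simp; omega
  | succ K ih =>
    have hb := pvSig_bounds cell x K
    rw [show x + (K+1) = (x+K)+1 by ring, pvSig]
    constructor
    · intro h t h1 h2
      have h3 : pvSig cell (x+K) - pvSig cell x = K ∧ cell (x+K) = true := by
        split_ifs at h with hc
        · refine ⟨?_, hc⟩; push_cast at h; omega
        · exfalso; push_cast at h; omega
      by_cases h4 : t < x + K
      · exact ih.mp h3.1 t h1 h4
      · rw [show t = x + K by omega]; exact h3.2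
    · intro h
      have hc : cell (x+K) = true := h _ (by omega) (by omega)
      have : pvSig cell (x+K) - pvSig cell x = K := ih.mpr (fun t a b => h t a (by omega))
      rw [if_pos hc]; push_cast; omega

theorem pvRun_iff (cell : Nat → Bool) (m : Nat) : ∀ K : Nat,
    K ≤ pvRun cell m ↔ K ≤ m ∧ ∀ t, m - K ≤ t → t < m → cell t = true := by
  induction m with
  | zero =>
    intro K
    simp only [pvRun, Nat.le_zero]
    constructor
    · rintro rfl; exact ⟨rfl, fun t a b => absurd b (by omega)⟩
    · exact fun h => h.1
  | succ m ih =>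
    intro K
    rw [pvRun]
    by_cases hc : cell m = true
    · rw [if_pos hc]
      constructor
      · intro h
        rcases Nat.eq_zero_or_pos K with h0 | h0
        · simp [h0]; omega
        · have := (ih (K-1)).mp (by omega)
          refine ⟨by omega, fun t h1 h2 => ?_⟩
          rcases Nat.lt_succ_iff_lt_or_eq.mp h2 with h3 | h3
          · exact this.2 t (by omega) h3
          · rw [h3]; exact hc
      · intro ⟨h1, h2⟩
        rcases Nat.eq_zero_or_pos K with h0 | h0
        · omega
        · have := (ih (K-1)).mpr ⟨by omega, fun t a b => h2 t (by omega) (by omega)⟩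
          omega
    · rw [if_neg hc]
      simp only [Nat.le_zero]
      constructor
      · intro h; subst h; exact ⟨by omega, fun t a b => absurd b (by omega)⟩
      · intro ⟨h1, h2⟩
        by_contra hK
        exact hc (h2 m (by omega) (by omega))

theorem pvRun_le (cell : Nat → Bool) (m : Nat) : pvRun cell m ≤ m := by
  induction m with
  | zero => simp [pvRun]
  | succ m ih => rw [pvRun]; split_ifs <;> omega

theorem pvWin (cell : Nat → Bool) (K m : Nat) :
    (K ≤ m + 1 ∧ pvSig cell (m + 1) - pvSig cell (m + 1 - K) = K) ↔ K ≤ pvRun cell (m + 1) := by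
  rw [pvRun_iff]
  constructor
  · intro ⟨h1, h2⟩
    refine ⟨h1, ?_⟩
    have := (pvSig_window cell (m+1-K) K).mp (by rw [show m+1-K+K = m+1 by omega]; exact h2)
    intro t a b; exact this t a (by omega)
  · intro ⟨h1, h2⟩
    refine ⟨h1, ?_⟩
    have := (pvSig_window cell (m+1-K) K).mpr (fun t a b => h2 t (by omega) (by omega))
    rw [show m+1-K+K = m+1 by omega] at this; exact this

-- A's inner loop over one line, characterised by pvCnt / pvRun
theorem pvAline (cell : Int → Bool) (k : Int) (n : Nat) (num0 : Int) :
    (PySem.List.pyRange 0 (n : Int) 1).foldl (fun (p : Int × Int) j =>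
        let count := if cell j then p.2 + 1 else 0
        (if count ≥ k then p.1 + 1 else p.1, count)) (num0, 0)
      = (num0 + pvCnt (fun m => cell (m : Int)) k.toNat n,
         (pvRun (fun m => cell (m : Int)) n : Int)) := by
  induction n with
  | zero => simp [PySem.List.pyRange_one_eq_nil, pvCnt, pvRun]
  | succ n ih =>
    have h1 : ((n + 1 : Nat) : Int) = (n : Int) + 1 := by push_cast; ring
    rw [h1, PySem.List.pyRange_one_succ_right (by positivity), List.foldl_append, ih]
    simp only [List.foldl_cons, List.foldl_nil, pvCnt, pvRun]
    split_ifs with h h2 h3 <;> simp_all <;> omega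

-- B's prefix list over one line is the table of pvSig values
theorem pvBpref (cell : Int → Bool) (n : Nat) :
    (PySem.List.pyRange 0 (n : Int) 1).foldl (fun pref j =>
        pref ++ [PySem.List.pyGetD pref (-1) 0 + (if cell j then 1 else 0)]) [(0 : Int)]
      = (List.range (n + 1)).map (fun m => pvSig (fun m => cell (m : Int)) m) := by
  induction n with
  | zero => simp [PySem.List.pyRange_one_eq_nil, pvSig, List.range_succ]
  | succ n ih =>
    have h1 : ((n + 1 : Nat) : Int) = (n : Int) + 1 := by push_cast; ring
    rw [h1, PySem.List.pyRange_one_succ_right (by positivity), List.foldl_append, ih]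
    simp only [List.foldl_cons, List.foldl_nil]
    rw [List.range_succ (n := n + 1), List.map_append]
    congr 1
    have hne : ((List.range (n + 1)).map (fun m => pvSig (fun m => cell (m : Int)) m)) ≠ [] := by
      simp [List.range_succ]
    rw [PySem.List.pyGetD_neg_one _ _ hne]
    simp [List.range_succ, pvSig]

theorem pvPrefGet (cell : Nat → Bool) (N i : Nat) (h : i ≤ N) :
    PySem.List.pyGetD ((List.range (N + 1)).map (fun m => pvSig cell m)) ((i : Nat) : Int) 0
      = pvSig cell i := by
  rw [PySem.List.pyGetD_natCast]
  rw [List.getD_eq_getElem?_getD]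
  simp [List.getElem?_map, List.getElem?_range (by omega : i < N + 1)]

-- B's window loop over one line equals the same pvCnt count
theorem pvBline (cell : Int → Bool) (k : Int) (hk : 0 ≤ k) (N : Nat) (n : Nat) (hn : n ≤ N) (t0 : Int) :
    (PySem.List.pyRange 0 (n : Int) 1).foldl (fun total j =>
        if j + 1 ≥ k ∧ PySem.List.pyGetD ((List.range (N + 1)).map (fun m => pvSig (fun m => cell (m : Int)) m)) (j + 1) 0
              - PySem.List.pyGetD ((List.range (N + 1)).map (fun m => pvSig (fun m => cell (m : Int)) m)) (j + 1 - k) 0 = k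
        then total + 1 else total) t0
      = t0 + pvCnt (fun m => cell (m : Int)) k.toNat n := by
  induction n with
  | zero => simp [PySem.List.pyRange_one_eq_nil, pvCnt]
  | succ n ih =>
    have h1 : ((n + 1 : Nat) : Int) = (n : Int) + 1 := by push_cast; ring
    rw [h1, PySem.List.pyRange_one_succ_right (by positivity), List.foldl_append,
        ih (by omega)]
    simp only [List.foldl_cons, List.foldl_nil, pvCnt]
    set cc : Nat → Bool := fun m => cell (m : Int) with hcc
    have hK : k = (k.toNat : Int) := by omega
    have hcond : ((n : Int) + 1 ≥ k ∧
        PySem.List.pyGetD ((List.range (N + 1)).map (fun m => pvSig cc m)) ((n : Int) + 1) 0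
          - PySem.List.pyGetD ((List.range (N + 1)).map (fun m => pvSig cc m)) ((n : Int) + 1 - k) 0 = k)
        ↔ k.toNat ≤ pvRun cc (n + 1) := by
      by_cases hc1 : (n : Int) + 1 ≥ k
      · have e1 : (n : Int) + 1 = ((n + 1 : Nat) : Int) := by push_cast; ring
        have e2 : (n : Int) + 1 - k = ((n + 1 - k.toNat : Nat) : Int) := by omega
        rw [e2, e1, pvPrefGet cc N (n + 1) (by omega), pvPrefGet cc N (n + 1 - k.toNat) (by omega)]
        rw [← pvWin cc k.toNat n]
        constructor
        · intro ⟨_, h⟩; exact ⟨by omega, by rw [hK] at h; exact h⟩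
        · intro ⟨h2, h⟩; exact ⟨hc1, by rw [hK]; exact h⟩
      · constructor
        · intro h; exact absurd h.1 hc1
        · intro h; exfalso; have := pvRun_le cc (n + 1); omega
    simp only [hcond]
    split_ifs <;> omega


-- row passes of A and B agree (pointwise per row via pvAline / pvBpref / pvBline)
theorem pvRowPass (a : List String) (k : Int) (hk : 0 ≤ k) (R C : Nat) (init : Int) :
    (PySem.List.pyRange 0 (R : Int) 1).foldl (fun num i =>
      ((PySem.List.pyRange 0 (C : Int) 1).foldl (fun (p : Int × Int) j =>
        let count := if pvFree a i j then p.2 + 1 else 0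
        (if count ≥ k then p.1 + 1 else p.1, count)) (num, 0)).1) init
    = (PySem.List.pyRange 0 (R : Int) 1).foldl (fun total i =>
      let pref := (PySem.List.pyRange 0 (C : Int) 1).foldl (fun pref j =>
        pref ++ [PySem.List.pyGetD pref (-1) 0 + (if pvFree a i j then 1 else 0)]) [(0 : Int)]
      (PySem.List.pyRange 0 (C : Int) 1).foldl (fun total j =>
        if j + 1 ≥ k ∧ PySem.List.pyGetD pref (j + 1) 0 - PySem.List.pyGetD pref (j + 1 - k) 0 = k
        then total + 1 else total) total) init := by
  apply PySem.List.foldl_congr_mem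
  intro acc i hi
  rw [pvAline _ k C acc]
  dsimp only
  rw [pvBpref (fun j => pvFree a i j) C, pvBline (fun j => pvFree a i j) k hk C C le_rfl acc]

-- column passes of A and B agree
theorem pvColPass (a : List String) (k : Int) (hk : 0 ≤ k) (R C : Nat) (init : Int) :
    (PySem.List.pyRange 0 (C : Int) 1).foldl (fun num j =>
      ((PySem.List.pyRange 0 (R : Int) 1).foldl (fun (p : Int × Int) i =>
        let count := if pvFree a i j then p.2 + 1 else 0
        (if count ≥ k then p.1 + 1 else p.1, count)) (num, 0)).1) init
    = (PySem.List.pyRange 0 (C : Int) 1).foldl (fun total j =>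
      let pref := (PySem.List.pyRange 0 (R : Int) 1).foldl (fun pref i =>
        pref ++ [PySem.List.pyGetD pref (-1) 0 + (if pvFree a i j then 1 else 0)]) [(0 : Int)]
      (PySem.List.pyRange 0 (R : Int) 1).foldl (fun total i =>
        if i + 1 ≥ k ∧ PySem.List.pyGetD pref (i + 1) 0 - PySem.List.pyGetD pref (i + 1 - k) 0 = k
        then total + 1 else total) total) init := by
  apply PySem.List.foldl_congr_mem
  intro acc j hj
  rw [pvAline _ k R acc]
  dsimp only
  rw [pvBpref (fun i => pvFree a i j) R, pvBline (fun i => pvFree a i j) k hk R R le_rfl acc]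

-- ===== VERDICT (by name: the statement is the Claim_ definition above) =====
theorem process_seat_arrangements_spec : Claim_equal_process_seat_arrangements := by
  intro a r c k hdom hpre
  unfold Spec_process_seat_arrangements process_seat_arrangements process_seat_arrangements_alt
  by_cases he : k > r ∧ k > c
  · rw [if_pos he, if_pos he]
  by_cases hrc : 1 ≤ r ∧ 1 ≤ c
  · obtain ⟨hk, -, -⟩ := hpre ⟨hrc.1, hrc.2, he⟩
    obtain ⟨R, rfl⟩ : ∃ R : Nat, r = (R : Int) := ⟨r.toNat, by omega⟩
    obtain ⟨C, rfl⟩ : ∃ C : Nat, c = (C : Int) := ⟨c.toNat, by omega⟩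
    rw [if_neg he, if_neg he]
    dsimp only
    rw [pvRowPass a k hk R C 0, pvColPass a k hk R C]
  · have h0 : r ≤ 0 ∨ c ≤ 0 := by
      by_contra h
      push Not at h
      exact hrc ⟨by omega, by omega⟩
    rcases h0 with h0 | h0
    · rw [PySem.List.pyRange_one_eq_nil h0]
      split_ifs <;> simp [List.foldl_fixed']
    · rw [PySem.List.pyRange_one_eq_nil h0]
      split_ifs <;> simp [List.foldl_fixed']
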